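-- pv_equiv track=rewrite | github.com/lhoju0158/boj | 프로그래머스/1/42840. 모의고사/모의고사.py | solution
-- ===== SOURCE A (Python) =====
-- def solution(answers):
--     answer = []
--     no1 = [1, 2, 3, 4, 5]
--     no2 = [2, 1, 2, 3, 2, 4, 2, 5]
--     no3 = [3, 3, 1, 1, 2, 2, 4, 4, 5, 5]
--     n1,n2,n3 = 0,0,0
--     for i in range(len(answers)):
--         if no1[i%len(no1)]==answers[i]:
--             n1+=1
--         if no2[i%len(no2)]==answers[i]:
--             n2+=1
--         if no3[i%len(no3)]==answers[i]:
--             n3+=1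
--     if max(n1,n2,n3) == n1:
--         answer.append(1)
--     if max(n1,n2,n3) == n2:
--         answer.append(2)
--     if max(n1,n2,n3) == n3:
--         answer.append(3)
--     return answer
-- ===== SOURCE B (Python) =====
-- def solution(answers):
--     no1 = [1, 2, 3, 4, 5]
--     no2 = [2, 1, 2, 3, 2, 4, 2, 5]
--     no3 = [3, 3, 1, 1, 2, 2, 4, 4, 5, 5]
--     # The three patterns jointly repeat with period lcm(5,8,10) = 40: precompute
--     # the expected answers of each student for one full period.
--     table = [[no1[r % 5], no2[r % 8], no3[r % 10]] for r in range(40)]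
--     # One pass: histogram of (position mod 40, given answer) pairs.
--     cnt = {}
--     for i, a in enumerate(answers):
--         key = (i % 40, a)
--         cnt[key] = cnt.get(key, 0) + 1
--     # Each score is read off the histogram with at most 40 lookups.
--     scores = [sum(cnt.get((r, t[k]), 0) for r, t in enumerate(table)) for k in range(3)]
--     m = max(scores)
--     return [k + 1 for k, s in enumerate(scores) if s == m]
-- ===== Notes on version B (the rewrite author's own statement) =====
-- stated objective: alternative
-- what changed: B replaces A's per-element comparison against the three cyclic patterns by a different data structure: it precomputes the 40-entry period table (lcm of the pattern lengths), builds a histogram dict of (index mod 40, answer) pairs in one pass, reads each student's score off the histogram with 40 dictionary lookups, and selects the winners from the scores list.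
import Mathlib
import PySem

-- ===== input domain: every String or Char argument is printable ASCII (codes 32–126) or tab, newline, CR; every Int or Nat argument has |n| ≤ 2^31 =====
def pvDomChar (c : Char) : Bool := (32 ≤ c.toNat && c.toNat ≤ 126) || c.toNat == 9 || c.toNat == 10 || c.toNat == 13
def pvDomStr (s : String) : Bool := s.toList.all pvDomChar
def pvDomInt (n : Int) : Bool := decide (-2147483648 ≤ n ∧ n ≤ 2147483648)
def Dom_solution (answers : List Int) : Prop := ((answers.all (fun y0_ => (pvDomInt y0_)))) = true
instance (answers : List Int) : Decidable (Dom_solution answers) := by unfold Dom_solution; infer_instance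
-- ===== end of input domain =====

-- B replaces A's per-element comparison against three cyclic patterns by a histogram of
-- (index mod 40, answer) pairs read off against a precomputed 40-entry period table (alternative decomposition, same value).

-- ===== PORT A =====
-- A: one interleaved pass over the indices keeping three counters, then an if-chain of appends.
-- pyGetD with default 0 is exact here: every index used is in range (i ∈ range(len answers), i % len p < len p).
def pvStepA (answers : List Int) (s : Int × Int × Int) (i : Int) : Int × Int × Int :=
  let no1 : List Int := [1, 2, 3, 4, 5]
  let no2 : List Int := [2, 1, 2, 3, 2, 4, 2, 5]
  let no3 : List Int := [3, 3, 1, 1, 2, 2, 4, 4, 5, 5]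
  let s := if PySem.List.pyGetD no1 (PySem.Int.mod i (no1.length : Int)) 0 == PySem.List.pyGetD answers i 0
           then (s.1 + 1, s.2.1, s.2.2) else s
  let s := if PySem.List.pyGetD no2 (PySem.Int.mod i (no2.length : Int)) 0 == PySem.List.pyGetD answers i 0
           then (s.1, s.2.1 + 1, s.2.2) else s
  if PySem.List.pyGetD no3 (PySem.Int.mod i (no3.length : Int)) 0 == PySem.List.pyGetD answers i 0
  then (s.1, s.2.1, s.2.2 + 1) else s

def solution (answers : List Int) : List Int :=
  let ns : Int × Int × Int :=
    (PySem.List.pyRange 0 (answers.length : Int) 1).foldl (pvStepA answers) (0, 0, 0)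
  let mx := max ns.1 (max ns.2.1 ns.2.2)
  let answer : List Int := []
  let answer := if mx == ns.1 then answer ++ [1] else answer
  let answer := if mx == ns.2.1 then answer ++ [2] else answer
  if mx == ns.2.2 then answer ++ [3] else answer

-- ===== PORT B =====
-- B: precompute the 40-entry period table (lcm(5,8,10) = 40) of the three students' expected
-- answers, build a histogram dict of (i % 40, answers[i]) pairs in one pass, read each score
-- off the histogram with 40 lookups, then pick the winners.  pyGetD default 0 exact: r % L in range.
def solution_alt (answers : List Int) : List Int :=
  let no1 : List Int := [1, 2, 3, 4, 5]
  let no2 : List Int := [2, 1, 2, 3, 2, 4, 2, 5]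
  let no3 : List Int := [3, 3, 1, 1, 2, 2, 4, 4, 5, 5]
  let table : List (List Int) := (PySem.List.pyRange 0 40 1).map (fun r =>
    [PySem.List.pyGetD no1 (PySem.Int.mod r 5) 0,
     PySem.List.pyGetD no2 (PySem.Int.mod r 8) 0,
     PySem.List.pyGetD no3 (PySem.Int.mod r 10) 0])
  let cnt : PySem.Dict (Int × Int) Int :=
    (PySem.List.enumerate answers 0).foldl
      (fun d ia =>
        let key : Int × Int := (PySem.Int.mod ia.1 40, ia.2)
        d.insert key (d.getD key 0 + 1)) PySem.Dict.empty
  let scores : List Int := (PySem.List.pyRange 0 3 1).map (fun k =>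
    ((PySem.List.enumerate table 0).map
       (fun rt => cnt.getD (rt.1, PySem.List.pyGetD rt.2 k 0) 0)).sum)
  let m := (PySem.List.max? scores (fun y => y)).getD 0  -- scores has 3 elements, so max? = some (max never raises)
  (PySem.List.enumerate scores 0).foldl
    (fun acc ks => if ks.2 == m then acc ++ [ks.1 + 1] else acc) []

-- ===== PRECONDITION & SPEC =====
def Spec_solution (answers : List Int) (out : List Int) : Prop := out = solution_alt answers
instance (answers : List Int) (out : List Int) : Decidable (Spec_solution answers out) := by unfold Spec_solution; infer_instance

-- ===== CLAIM (what is proved, stated in full; the proofs are below) =====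
def Claim_equal_solution : Prop := ∀ (answers : List Int), Dom_solution answers → Spec_solution answers (solution answers)

-- ===== LEMMAS AND PROOFS =====

def pvHit (p answers : List Int) (n i : Int) : Int :=
  if PySem.List.pyGetD p (PySem.Int.mod i (p.length : Int)) 0 == PySem.List.pyGetD answers i 0 then n + 1 else n

-- A's interleaved step updates the three counters independently
theorem pvStepA_eq (answers : List Int) :
    pvStepA answers = fun s i =>
      (pvHit [1, 2, 3, 4, 5] answers s.1 i,
       pvHit [2, 1, 2, 3, 2, 4, 2, 5] answers s.2.1 i,
       pvHit [3, 3, 1, 1, 2, 2, 4, 4, 5, 5] answers s.2.2 i) := by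
  funext s i
  simp only [pvStepA, pvHit]
  split_ifs <;> rfl

-- a fold whose step updates the three components independently splits into three folds
theorem foldl_triple (l : List Int) (g1 g2 g3 : Int → Int → Int) (a b c : Int) :
    l.foldl (fun (s : Int × Int × Int) i => (g1 s.1 i, g2 s.2.1 i, g3 s.2.2 i)) (a, b, c)
      = (l.foldl g1 a, l.foldl g2 b, l.foldl g3 c) := by
  induction l generalizing a b c with
  | nil => rfl
  | cons x t ih => simpa [List.foldl] using ih (g1 a x) (g2 b x) (g3 c x)

-- A's per-pattern counter over range indices, as countP over enumerate
def pvMatch (p : List Int) (ia : Int × Int) : Bool :=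
  PySem.List.pyGetD p (PySem.Int.mod ia.1 (p.length : Int)) 0 == ia.2


theorem rangeFold_eq_countP (p answers : List Int) :
    (PySem.List.pyRange 0 (answers.length : Int) 1).foldl (pvHit p answers) 0
      = ((PySem.List.enumerate answers 0).countP (pvMatch p) : Int) := by
  rw [PySem.List.enumerate_eq_map_pyRange answers 0, List.countP_map]
  unfold pvHit pvMatch
  simp only [PySem.List.len_eq]
  rw [PySem.List.foldl_count_if]
  simp [Function.comp_def]

-- B-side: the key list of the histogram
def pvKeys (t : List Int) (s : Int) : List (Int × Int) :=
  (PySem.List.enumerate t s).map (fun ia => (PySem.Int.mod ia.1 40, ia.2))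

theorem prod_beq (q x : Int × Int) : (q == x) = (q.1 == x.1 && q.2 == x.2) := by
  rcases q with ⟨a, b⟩; rcases x with ⟨c, d⟩; rfl

-- only the j = r entries of a countP over ints survive
theorem countP_fst (l : List Int) (r : Int) (p : Int → Bool) :
    l.countP (fun j => r == j && p j) = if p r then l.count r else 0 := by
  induction l with
  | nil => simp
  | cons y t ih =>
    by_cases hy : y = r
    · subst hy
      by_cases hp : p y <;> simp [ih, hp]
    · simp [hy, ih, Ne.symm hy]

-- the 40-lookup sum against a period-table column counts exactly the matches

theorem hist_sum (g : Int → Int) (t : List Int) : ∀ s : Int, 0 ≤ s →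
    (((PySem.List.pyRange 0 40 1).map (fun j => ((j, g j) : Int × Int))).map
       (fun q => ((pvKeys t s).count q : Int))).sum
      = ((PySem.List.enumerate t s).countP (fun ia => g (PySem.Int.mod ia.1 40) == ia.2) : Int) := by
  induction t with
  | nil =>
    intro s hs
    simp [pvKeys, Function.comp_def]
  | cons x t ih =>
    intro s hs
    have hmem : PySem.Int.mod s 40 ∈ PySem.List.pyRange 0 40 1 := by
      rw [PySem.List.mem_pyRange_one]
      exact ⟨PySem.Int.mod_nonneg s (by norm_num), PySem.Int.mod_lt s (by norm_num)⟩
    have hcount1 : (PySem.List.pyRange 0 40 1).count (PySem.Int.mod s 40) = 1 :=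
      List.count_eq_one_of_mem (PySem.List.nodup_pyRange_one 0 40) hmem
    have hind :
        (((PySem.List.pyRange 0 40 1).map (fun j => ((j, g j) : Int × Int))).map
           (fun q => if ((PySem.Int.mod s 40, x) : Int × Int) == q then (1 : Int) else 0)).sum
          = if g (PySem.Int.mod s 40) == x then (1 : Int) else 0 := by
      rw [PySem.List.sum_map_ite_one_zero, List.countP_map]
      simp only [Function.comp_def, prod_beq]
      rw [countP_fst (PySem.List.pyRange 0 40 1) (PySem.Int.mod s 40) (fun j => x == g j)]
      rw [hcount1]
      simp only [beq_iff_eq]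
      by_cases h : x = g (PySem.Int.mod s 40)
      · rw [if_pos h, if_pos h.symm]; norm_num
      · rw [if_neg h, if_neg (fun hh => h hh.symm)]; norm_num
    simp only [pvKeys, PySem.List.enumerate_cons, List.map_cons, List.count_cons,
      List.countP_cons]
    push_cast
    rw [PySem.List.sum_map_add_int]
    have ih' := ih (s + 1) (by omega)
    simp only [pvKeys] at ih'
    rw [ih', hind]

-- the final winner selection of A and of B agree for any three counters
theorem finish (n1 n2 n3 : Int) :
    (let mx := max n1 (max n2 n3)
     let a0 : List Int := []
     let a1 := if mx == n1 then a0 ++ [1] else a0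
     let a2 := if mx == n2 then a1 ++ [2] else a1
     if mx == n3 then a2 ++ [3] else a2)
    = (let m := (PySem.List.max? [n1, n2, n3] (fun y => y)).getD 0
       (PySem.List.enumerate [n1, n2, n3] 0).foldl
         (fun (acc : List Int) is => if is.2 == m then acc ++ [is.1 + 1] else acc) []) := by
  simp only [PySem.List.max?_id_cons, List.foldl, PySem.List.enumerate_cons,
    PySem.List.enumerate_nil, Option.getD_some, beq_iff_eq]
  split_ifs <;> first | rfl | (exfalso; omega)


theorem mod_mod_40 (i : Int) {L : Int} (hL : 0 < L) (hdvd : L ∣ 40) :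
    PySem.Int.mod (PySem.Int.mod i 40) L = PySem.Int.mod i L := by
  rw [PySem.Int.mod_eq_emod_of_pos hL, PySem.Int.mod_eq_emod_of_pos hL,
    PySem.Int.mod_eq_emod_of_pos (show (0:Int) < 40 by norm_num)]
  exact Int.emod_emod_of_dvd i hdvd

-- B's 40-lookup histogram sum for one pattern equals A's per-pattern running counter
theorem scoreB (p : List Int) (L : Int) (hL : 0 < L) (hdvd : L ∣ 40)
    (hlen : (p.length : Int) = L) (answers : List Int) :
    (((PySem.List.pyRange 0 40 1).map
        (fun j => ((j, PySem.List.pyGetD p (PySem.Int.mod j L) 0) : Int × Int))).map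
       (fun q => ((pvKeys answers 0).count q : Int))).sum
      = (PySem.List.pyRange 0 (answers.length : Int) 1).foldl (pvHit p answers) 0 := by
  rw [hist_sum _ answers 0 le_rfl, rangeFold_eq_countP]
  congr 1
  apply List.countP_congr
  intro ia _
  simp only [pvMatch, hlen, mod_mod_40 ia.1 hL hdvd]

def pvTable : List (List Int) :=
  (PySem.List.pyRange 0 40 1).map (fun r =>
    [PySem.List.pyGetD [1, 2, 3, 4, 5] (PySem.Int.mod r 5) 0,
     PySem.List.pyGetD [2, 1, 2, 3, 2, 4, 2, 5] (PySem.Int.mod r 8) 0,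
     PySem.List.pyGetD [3, 3, 1, 1, 2, 2, 4, 4, 5, 5] (PySem.Int.mod r 10) 0])

-- one column of B's histogram-lookup sum = A's per-pattern counter
theorem colSum (answers : List Int) (k : Int) (p : List Int) (L : Int)
    (hL : 0 < L) (hdvd : L ∣ 40) (hlen : (p.length : Int) = L)
    (htab : (PySem.List.enumerate pvTable 0).map
        (fun rt => ((rt.1, PySem.List.pyGetD rt.2 k 0) : Int × Int))
      = (PySem.List.pyRange 0 40 1).map
          (fun j => ((j, PySem.List.pyGetD p (PySem.Int.mod j L) 0) : Int × Int))) :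
    ((PySem.List.enumerate pvTable 0).map
       (fun rt => (PySem.Dict.counter (pvKeys answers 0)).getD (rt.1, PySem.List.pyGetD rt.2 k 0) 0)).sum
      = (PySem.List.pyRange 0 (answers.length : Int) 1).foldl (pvHit p answers) 0 := by
  calc ((PySem.List.enumerate pvTable 0).map
       (fun rt => (PySem.Dict.counter (pvKeys answers 0)).getD (rt.1, PySem.List.pyGetD rt.2 k 0) 0)).sum
      = (((PySem.List.enumerate pvTable 0).map
           (fun rt => ((rt.1, PySem.List.pyGetD rt.2 k 0) : Int × Int))).map
           (fun q => (PySem.Dict.counter (pvKeys answers 0)).getD q 0)).sum := by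
        simp [List.map_map, Function.comp_def]
    _ = (((PySem.List.pyRange 0 40 1).map
           (fun j => ((j, PySem.List.pyGetD p (PySem.Int.mod j L) 0) : Int × Int))).map
           (fun q => (PySem.Dict.counter (pvKeys answers 0)).getD q 0)).sum := by rw [htab]
    _ = (((PySem.List.pyRange 0 40 1).map
           (fun j => ((j, PySem.List.pyGetD p (PySem.Int.mod j L) 0) : Int × Int))).map
           (fun q => ((pvKeys answers 0).count q : Int))).sum := by
        simp only [PySem.Dict.getD_counter]
    _ = _ := scoreB p L hL hdvd hlen answers

theorem solution_eq_alt (answers : List Int) : solution answers = solution_alt answers := by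
  have hcnt : ((PySem.List.enumerate answers 0).foldl
      (fun d ia =>
        let key : Int × Int := (PySem.Int.mod ia.1 40, ia.2)
        d.insert key (d.getD key 0 + 1)) PySem.Dict.empty)
      = PySem.Dict.counter (pvKeys answers 0) := by
    rw [← PySem.Dict.foldl_insert_getD_add_one_eq_counter, pvKeys, List.foldl_map]
  simp only [solution, solution_alt, pvStepA_eq, foldl_triple]
  rw [hcnt]
  rw [show ((PySem.List.pyRange 0 40 1).map (fun r =>
      [PySem.List.pyGetD [1, 2, 3, 4, 5] (PySem.Int.mod r 5) 0,
       PySem.List.pyGetD [2, 1, 2, 3, 2, 4, 2, 5] (PySem.Int.mod r 8) 0,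
       PySem.List.pyGetD [3, 3, 1, 1, 2, 2, 4, 4, 5, 5] (PySem.Int.mod r 10) 0]))
    = pvTable from rfl]
  rw [show PySem.List.pyRange 0 3 1 = [0, 1, 2] from rfl]
  simp only [List.map_cons, List.map_nil]
  simp only [colSum answers 0 [1, 2, 3, 4, 5] 5 (by norm_num) (by norm_num) (by norm_num) (by decide),
    colSum answers 1 [2, 1, 2, 3, 2, 4, 2, 5] 8 (by norm_num) (by norm_num) (by norm_num) (by decide),
    colSum answers 2 [3, 3, 1, 1, 2, 2, 4, 4, 5, 5] 10 (by norm_num) (by norm_num) (by norm_num) (by decide)]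
  exact finish _ _ _

-- ===== VERDICT (by name: the statement is the Claim_ definition above) =====
theorem solution_spec : Claim_equal_solution := by
  intro answers _
  unfold Spec_solution
  exact solution_eq_alt answers
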